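-- pv_equiv track=rewrite | github.com/antonroesler/ACM | 10_Geometry/tempCodeRunnerFile.py | find_min_y
-- ===== SOURCE A (Python) =====
-- def find_min_y(points):
--     """Find the point with smallest y value."""
--     y = float('inf')
--     idx = 0
--     for i, point in enumerate(points):
--         if point[1] < y:
--             y = point[1]
--             idx = i
--         if point[1] == y:  # If same y value, use the one with smaller x value
--             if point[0] < points[idx][0]:
--                 idx = i
--     return points[idx], idx
-- ===== SOURCE B (Python) =====
-- def find_min_y(points):
--     """Find the point with smallest y value."""
--     order = sorted(range(len(points)), key=lambda i: (points[i][1], points[i][0]))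
--     idx = order[0]
--     return points[idx], idx
-- ===== Notes on version B (the rewrite author's own statement) =====
-- stated objective: simpler
-- what changed: Replaces the running-minimum loop with explicit y/x tie-break branches by a stable sort of the indices under the lexicographic key (y, x), returning the first index of the sorted order.
import Mathlib
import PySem

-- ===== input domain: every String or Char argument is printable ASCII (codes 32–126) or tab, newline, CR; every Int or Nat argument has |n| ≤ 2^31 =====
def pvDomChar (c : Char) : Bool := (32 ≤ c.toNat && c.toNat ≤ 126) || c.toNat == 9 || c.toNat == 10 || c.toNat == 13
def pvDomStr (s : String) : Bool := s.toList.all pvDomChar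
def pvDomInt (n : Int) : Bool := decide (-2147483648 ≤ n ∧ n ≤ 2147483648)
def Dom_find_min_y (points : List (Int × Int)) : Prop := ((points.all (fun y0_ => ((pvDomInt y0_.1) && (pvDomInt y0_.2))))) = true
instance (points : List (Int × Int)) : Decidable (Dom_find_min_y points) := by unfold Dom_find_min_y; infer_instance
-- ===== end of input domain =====

-- B replaces A's running-minimum loop (with explicit y/x tie-break branches) by a
-- stable sort of the indices under the lexicographic key (y, x), taking the first index.


-- ===== PORT A =====
-- 'y = float('inf')' is modelled by 'none'; 'v < y' / 'v == y' against it: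
def pvYLt (v : Int) (y : Option Int) : Bool :=
  match y with
  | none => true
  | some w => v < w

def pvYEq (v : Int) (y : Option Int) : Bool :=
  match y with
  | none => false
  | some w => v == w

-- one iteration of A's loop body; state = (y, idx), p = (i, point)
def pvStepA (points : List (Int × Int)) (s : Option Int × Int) (p : Int × (Int × Int)) :
    Option Int × Int :=
  let s1 := if pvYLt p.2.2 s.1 then (some p.2.2, p.1) else s
  if pvYEq p.2.2 s1.1 then
    if p.2.1 < (PySem.List.pyGetD points s1.2 (0, 0)).1 then (s1.1, p.1) else s1
  else s1

def find_min_y (points : List (Int × Int)) : (Int × Int) × Int :=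
  let s := (PySem.List.enumerate points).foldl (pvStepA points) (none, 0)
  (PySem.List.pyGetD points s.2 (0, 0), s.2)

-- ===== PORT B =====
def pvKey1 (points : List (Int × Int)) (i : Int) : Int := (PySem.List.pyGetD points i (0, 0)).2
def pvKey2 (points : List (Int × Int)) (i : Int) : Int := (PySem.List.pyGetD points i (0, 0)).1

def find_min_y_alt (points : List (Int × Int)) : (Int × Int) × Int :=
  let order := PySem.List.sorted2 (PySem.List.pyRange 0 (points.length : Int) 1)
      (pvKey1 points) (pvKey2 points)
  let idx := PySem.List.pyGetD order 0 0
  (PySem.List.pyGetD points idx (0, 0), idx)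

-- ===== PRECONDITION & SPEC =====
-- On the empty list both Pythons raise IndexError (A at points[idx], B at order[0]).
def Pre_find_min_y (points : List (Int × Int)) : Prop := points ≠ []
instance (points : List (Int × Int)) : Decidable (Pre_find_min_y points) := by
  unfold Pre_find_min_y; infer_instance

def pvWitness_find_min_y : (List (Int × Int)) := ([(1, 2), (0, 2), (3, -1)])

def Spec_find_min_y (points : List (Int × Int)) (out : (Int × Int) × Int) : Prop := out = find_min_y_alt points
instance (points : List (Int × Int)) (out : (Int × Int) × Int) : Decidable (Spec_find_min_y points out) := by unfold Spec_find_min_y; infer_instance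

-- ===== CLAIM (what is proved, stated in full; the proofs are below) =====
def Claim_equal_find_min_y : Prop := ∀ (points : List (Int × Int)), Dom_find_min_y points → Pre_find_min_y points → Spec_find_min_y points (find_min_y points)

-- ===== LEMMAS AND PROOFS =====

-- the strict "comes before" test sorted2 uses, specialised to our keys
def pvBefore (points : List (Int × Int)) (a b : Int) : Bool :=
  decide (pvKey1 points a < pvKey1 points b) ||
    (!decide (pvKey1 points b < pvKey1 points a) && decide (pvKey2 points a < pvKey2 points b))

-- the best index after folding the remaining indices, starting from best i
def pvBest (points : List (Int × Int)) (l : List Int) (i : Int) : Int :=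
  l.foldl (fun m j => if pvBefore points j m then j else m) i

theorem pv_head_insertBy {α : Type} (before : α → α → Bool) (x : α) (acc : List α) :
    (PySem.List.insertBy before x acc).head? =
      some ((acc.head?.map (fun m => if before x m then x else m)).getD x) := by
  cases acc with
  | nil => simp [PySem.List.insertBy]
  | cons m t =>
      by_cases h : before x m = true <;> simp [PySem.List.insertBy, h]

theorem pv_head_foldl_insertBy {α : Type} (before : α → α → Bool) (l : List α)
    (acc : List α) :
    ((l.foldl (fun acc x => PySem.List.insertBy before x acc) acc).head?) =
      l.foldl (fun b x => some ((b.map (fun m => if before x m then x else m)).getD x))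
        acc.head? := by
  induction l generalizing acc with
  | nil => rfl
  | cons x t ih =>
      simp only [List.foldl_cons, ih, pv_head_insertBy]

theorem pv_foldl_some (points : List (Int × Int)) (l : List Int) (i : Int) :
    l.foldl (fun b x => some ((b.map
        (fun m => if pvBefore points x m then x else m)).getD x)) (some i) =
      some (pvBest points l i) := by
  induction l generalizing i with
  | nil => rfl
  | cons x t ih => simp only [List.foldl_cons, pvBest, Option.map_some, Option.getD_some, ih]

theorem pv_stepA_best (points : List (Int × Int)) (i j : Int) :
    pvStepA points (some (pvKey1 points i), i) (j, PySem.List.pyGetD points j (0, 0)) =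
      (some (pvKey1 points (if pvBefore points j i then j else i)),
       if pvBefore points j i then j else i) := by
  simp only [pvStepA, pvYLt, pvYEq, pvBefore, pvKey1, pvKey2]
  split_ifs <;> first | rfl | (simp_all <;> omega)

theorem pv_foldA_best (points : List (Int × Int)) (l : List Int) (i : Int) :
    l.foldl (fun s j => pvStepA points s (j, PySem.List.pyGetD points j (0, 0)))
        (some (pvKey1 points i), i) =
      (some (pvKey1 points (pvBest points l i)), pvBest points l i) := by
  induction l generalizing i with
  | nil => rfl
  | cons x t ih =>
      simp only [List.foldl_cons, pv_stepA_best, pvBest] at *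
      exact ih _

theorem pv_stepA_first (points : List (Int × Int)) :
    pvStepA points (none, 0) (0, PySem.List.pyGetD points 0 (0, 0)) =
      (some (pvKey1 points 0), 0) := by
  simp [pvStepA, pvYLt, pvYEq, pvKey1]

-- ===== VERDICT (by name: the statement is the Claim_ definition above) =====
theorem find_min_y_spec : Claim_equal_find_min_y := by
  intro points _ hpre
  unfold Spec_find_min_y
  simp only [find_min_y, find_min_y_alt]
  have hn : (0 : Int) < (points.length : Int) := by
    have := List.length_pos_iff.mpr hpre
    exact_mod_cast this
  have hrange : PySem.List.pyRange 0 (points.length : Int) 1 =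
      0 :: PySem.List.pyRange 1 (points.length : Int) 1 := by
    simpa using PySem.List.pyRange_one_cons hn
  -- B's side: the head of the stable insertion sort is the running lexicographic minimum
  have horder : (PySem.List.sorted2 (PySem.List.pyRange 0 (points.length : Int) 1)
      (pvKey1 points) (pvKey2 points)).head? =
      some (pvBest points (PySem.List.pyRange 1 (points.length : Int) 1) 0) := by
    have h1 : PySem.List.sorted2 (PySem.List.pyRange 0 (points.length : Int) 1)
        (pvKey1 points) (pvKey2 points)
        = (PySem.List.pyRange 0 (points.length : Int) 1).foldl
            (fun acc x => PySem.List.insertBy (fun a b => pvBefore points a b) x acc) [] := by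
      simp [PySem.List.sorted2, pvBefore]
    rw [h1, pv_head_foldl_insertBy, hrange]
    simp only [List.foldl_cons, List.head?_nil, Option.map_none, Option.getD_none]
    exact pv_foldl_some points (PySem.List.pyRange 1 (points.length : Int) 1) 0
  have hidx : PySem.List.pyGetD (PySem.List.sorted2 (PySem.List.pyRange 0 (points.length : Int) 1)
      (pvKey1 points) (pvKey2 points)) 0 0 =
      pvBest points (PySem.List.pyRange 1 (points.length : Int) 1) 0 := by
    rw [PySem.List.pyGetD_zero]
    cases hcase : (PySem.List.sorted2 (PySem.List.pyRange 0 (points.length : Int) 1)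
        (pvKey1 points) (pvKey2 points)) with
    | nil => rw [hcase] at horder; simp at horder
    | cons a t => rw [hcase] at horder; simp at horder; simp [horder]
  rw [hidx]
  -- A's side: the loop over enumerate(points) is the same running minimum
  rw [PySem.List.enumerate_eq_map_pyRange points (0, 0), List.foldl_map]
  have hlen : PySem.List.len points = (points.length : Int) := by
    simp [PySem.List.len]
  rw [hlen, hrange]
  simp only [List.foldl_cons, pv_stepA_first, pv_foldA_best]
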